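-- pv_equiv track=rewrite | github.com/ddr3FR/GeradorDeNPC_GAIA1 | life_Energi.py | qts_energi
-- ===== SOURCE A (Python) =====
-- def qts_energi(pts_PDA):
--     contador = 0
--     total_PE = 0
--     if pts_PDA == 1:
--         total_PE = 5
--     elif pts_PDA > 1:
--         while pts_PDA > 0:
--             contador += 1
--             pts_PDA -=1
--
--     total_PE = 5 + contador
--     return total_PE
-- ===== SOURCE B (Python) =====
-- def qts_energi(pts_PDA):
--     return 5 + pts_PDA if pts_PDA > 1 else 5
-- ===== Notes on version B (the rewrite author's own statement) =====
-- stated objective: faster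
-- what changed: Replaced the unit-decrement counting loop with a single closed-form arithmetic expression selected by one comparison.
import Mathlib
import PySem

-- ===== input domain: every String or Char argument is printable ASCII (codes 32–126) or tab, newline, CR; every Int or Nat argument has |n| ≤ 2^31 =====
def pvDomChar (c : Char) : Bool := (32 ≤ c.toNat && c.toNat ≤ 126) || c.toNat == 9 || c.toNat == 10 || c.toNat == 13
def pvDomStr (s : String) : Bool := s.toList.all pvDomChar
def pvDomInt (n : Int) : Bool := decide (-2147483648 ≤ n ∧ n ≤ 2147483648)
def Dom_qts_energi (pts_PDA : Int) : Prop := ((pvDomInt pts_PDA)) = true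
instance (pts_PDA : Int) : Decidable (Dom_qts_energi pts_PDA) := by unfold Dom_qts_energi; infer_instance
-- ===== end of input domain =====

-- B replaces A's unit-decrement counting loop with a closed-form arithmetic expression (objective: faster).

-- ===== PORT A =====
-- the 'while pts_PDA > 0: contador += 1; pts_PDA -= 1' loop, step for step
def qtsLoopA (pts_PDA contador : Int) : Int :=
  if h : pts_PDA > 0 then qtsLoopA (pts_PDA - 1) (contador + 1) else contador
termination_by pts_PDA.toNat
decreasing_by
  have : (pts_PDA - 1).toNat < pts_PDA.toNat := by omega
  exact this

def qts_energi (pts_PDA : Int) : Int :=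
  let contador : Int := 0
  -- if pts_PDA == 1: total_PE = 5 (later overwritten); elif pts_PDA > 1: run the loop
  let contador := if pts_PDA == 1 then contador
                  else if pts_PDA > 1 then qtsLoopA pts_PDA contador
                  else contador
  5 + contador

-- ===== PORT B =====
def qts_energi_alt (pts_PDA : Int) : Int :=
  if pts_PDA > 1 then 5 + pts_PDA else 5

-- ===== PRECONDITION & SPEC =====
def Spec_qts_energi (pts_PDA : Int) (out : Int) : Prop := out = qts_energi_alt pts_PDA
instance (pts_PDA : Int) (out : Int) : Decidable (Spec_qts_energi pts_PDA out) := by unfold Spec_qts_energi; infer_instance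

-- ===== CLAIM (what is proved, stated in full; the proofs are below) =====
def Claim_equal_qts_energi : Prop := ∀ (pts_PDA : Int), Dom_qts_energi pts_PDA → Spec_qts_energi pts_PDA (qts_energi pts_PDA)

-- ===== LEMMAS AND PROOFS =====
theorem qtsLoopA_eq (pts_PDA contador : Int) (h : 0 ≤ pts_PDA) :
    qtsLoopA pts_PDA contador = contador + pts_PDA := by
  induction pts_PDA, contador using qtsLoopA.induct with
  | case1 p c hp ih =>
      rw [qtsLoopA, dif_pos hp, ih (by omega)]; ring
  | case2 p c hp =>
      rw [qtsLoopA, dif_neg hp]; omega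

-- ===== VERDICT (by name: the statement is the Claim_ definition above) =====
theorem qts_energi_spec : Claim_equal_qts_energi := by
  intro pts_PDA _
  unfold Spec_qts_energi qts_energi qts_energi_alt
  by_cases h1 : pts_PDA = 1
  · simp [h1]
  · by_cases h2 : pts_PDA > 1
    · simp only [beq_iff_eq, h1, if_false, h2, if_true]
      rw [qtsLoopA_eq pts_PDA 0 (by omega)]; ring
    · simp [h1, h2]
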